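-- pv_equiv track=rewrite | github.com/PaddlePaddle/FastDeploy | benchmark/benchmark_ernie_seq_cls.py | convert_examples_to_data
-- ===== SOURCE A (Python) =====
-- def convert_examples_to_data(dataset, batch_size):
--     texts, text_pairs, labels = [], [], []
--     batch_text, batch_text_pair, batch_label = [], [], []
--
--     for i, item in enumerate(dataset):
--         batch_text.append(item['sentence1'])
--         batch_text_pair.append(item['sentence2'])
--         batch_label.append(item['label'])
--         if (i + 1) % batch_size == 0:
--             texts.append(batch_text)
--             text_pairs.append(batch_text_pair)
--             labels.append(batch_label)
--             batch_text, batch_text_pair, batch_label = [], [], []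
--     return texts, text_pairs, labels
-- ===== SOURCE B (Python) =====
-- def convert_examples_to_data(dataset, batch_size):
--     texts_flat = [item['sentence1'] for item in dataset]
--     pairs_flat = [item['sentence2'] for item in dataset]
--     labels_flat = [item['label'] for item in dataset]
--
--     def chunks(xs):
--         out = []
--         while 0 < batch_size <= len(xs):
--             out.append(xs[:batch_size])
--             xs = xs[batch_size:]
--         return out
--
--     return chunks(texts_flat), chunks(pairs_flat), chunks(labels_flat)
-- ===== Notes on version B (the rewrite author's own statement) =====
-- stated objective: alternative
-- what changed: Replaces A's single lockstep loop with index-modulo flush accumulation by a collect-then-chunk decomposition: three flat column lists are built first and each is cut into full batches by take/drop slicing.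
-- intended difference: For negative batch_size on a dataset with at least |batch_size| items, A's signed modulo accidentally emits batches of size |batch_size|, while B emits no batches, the intended result since no group of negative size can be formed. — e.g. on convert_examples_to_data([[("sentence1", "a"), ("sentence2", "b"), ("label", "c")]], -1): A returns ([["a"]], [["b"]], [["c"]]), B returns ([], [], [])
import Mathlib
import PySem

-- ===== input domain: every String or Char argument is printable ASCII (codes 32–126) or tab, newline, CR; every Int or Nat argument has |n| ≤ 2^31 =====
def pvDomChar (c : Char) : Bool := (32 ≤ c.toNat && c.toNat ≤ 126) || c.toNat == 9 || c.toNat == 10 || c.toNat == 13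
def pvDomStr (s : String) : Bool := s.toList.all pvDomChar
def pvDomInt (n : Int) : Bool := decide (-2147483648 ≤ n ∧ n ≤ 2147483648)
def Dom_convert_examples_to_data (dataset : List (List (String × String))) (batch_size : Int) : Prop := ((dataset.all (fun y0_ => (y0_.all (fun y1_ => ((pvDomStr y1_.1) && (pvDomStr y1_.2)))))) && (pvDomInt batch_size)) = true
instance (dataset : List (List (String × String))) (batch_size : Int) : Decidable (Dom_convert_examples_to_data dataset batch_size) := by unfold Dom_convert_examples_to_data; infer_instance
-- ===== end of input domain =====

-- B replaces A's lockstep modulo-flush accumulation loop by a collect-then-chunk decomposition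
-- (three flat column lists, each cut into full batches by slicing); alternative, same cost.


-- item[k]: first-match dict lookup; Pre_ guarantees the key is present (Python's KeyError is excluded there)
def pvGetKey (item : List (String × String)) (k : String) : String :=
  (PySem.Dict.mk item).getD k ""

-- ===== PORT A =====
-- the for-loop of A: state = (texts, pairs, labels, batch_text, batch_text_pair, batch_label), i the enumerate index
def aLoop (batch_size : Int) : Nat → List (List (String × String)) →
    List (List String) → List (List String) → List (List String) →
    List String → List String → List String →
    List (List String) × List (List String) × List (List String)
  | _, [], texts, pairs, labels, _, _, _ => (texts, pairs, labels)
  | i, item :: rest, texts, pairs, labels, bt, bp, bl =>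
    let bt' := bt ++ [pvGetKey item "sentence1"]
    let bp' := bp ++ [pvGetKey item "sentence2"]
    let bl' := bl ++ [pvGetKey item "label"]
    if PySem.Int.mod ((i : Int) + 1) batch_size = 0 then
      aLoop batch_size (i + 1) rest (texts ++ [bt']) (pairs ++ [bp']) (labels ++ [bl']) [] [] []
    else
      aLoop batch_size (i + 1) rest texts pairs labels bt' bp' bl'

def convert_examples_to_data (dataset : List (List (String × String))) (batch_size : Int) :
    List (List String) × List (List String) × List (List String) :=
  aLoop batch_size 0 dataset [] [] [] [] [] []

-- ===== PORT B =====
def bColumn (dataset : List (List (String × String))) (k : String) : List String :=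
  dataset.map (fun item => pvGetKey item k)

-- the while loop of B: while 0 < batch_size <= len(xs): out.append(xs[:batch_size]); xs = xs[batch_size:]
-- (the fuel argument, the initial list length, only makes the recursion structural; each pass shortens xs)
def bChunks (batch_size : Int) : Nat → List String → List (List String)
  | 0, _ => []
  | fuel + 1, xs =>
    if 0 < batch_size ∧ batch_size ≤ (xs.length : Int) then
      PySem.List.slice xs none (some batch_size) ::
        bChunks batch_size fuel (PySem.List.slice xs (some batch_size) none)
    else []

def convert_examples_to_data_alt (dataset : List (List (String × String))) (batch_size : Int) :
    List (List String) × List (List String) × List (List String) :=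
  (bChunks batch_size (bColumn dataset "sentence1").length (bColumn dataset "sentence1"),
   bChunks batch_size (bColumn dataset "sentence2").length (bColumn dataset "sentence2"),
   bChunks batch_size (bColumn dataset "label").length (bColumn dataset "label"))

-- ===== PRECONDITION & SPEC =====
-- Pre_ excludes exactly the inputs where the Python A raises: batch_size = 0 on a non-empty dataset
-- (ZeroDivisionError) and items missing one of the three keys (KeyError); the Nodup condition excludes
-- association lists no Python dict can be (duplicate keys), so the list determines the dict.
def Pre_convert_examples_to_data (dataset : List (List (String × String))) (batch_size : Int) : Prop :=
  (batch_size ≠ 0 ∨ dataset = []) ∧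
  ∀ item ∈ dataset, (item.map Prod.fst).Nodup ∧
    (PySem.Dict.mk item).contains "sentence1" = true ∧
    (PySem.Dict.mk item).contains "sentence2" = true ∧
    (PySem.Dict.mk item).contains "label" = true
instance (dataset : List (List (String × String))) (batch_size : Int) : Decidable (Pre_convert_examples_to_data dataset batch_size) := by unfold Pre_convert_examples_to_data; infer_instance

def pvWitness_convert_examples_to_data : (List (List (String × String))) × Int :=
  ([[("sentence1", "a"), ("sentence2", "b"), ("label", "c")]], 1)

-- For negative batch_size on a dataset with at least |batch_size| items, A's signed modulo accidentally
-- emits batches of size |batch_size|, while B emits no batches, the intended result since no group of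
-- negative size can be formed.
def D_convert_examples_to_data (dataset : List (List (String × String))) (batch_size : Int) : Prop :=
  batch_size < 0 ∧ -batch_size ≤ (dataset.length : Int)
instance (dataset : List (List (String × String))) (batch_size : Int) : Decidable (D_convert_examples_to_data dataset batch_size) := by unfold D_convert_examples_to_data; infer_instance

def Spec_convert_examples_to_data (dataset : List (List (String × String))) (batch_size : Int) (out : List (List String) × List (List String) × List (List String)) : Prop := ¬ D_convert_examples_to_data dataset batch_size → out = convert_examples_to_data_alt dataset batch_size
instance (dataset : List (List (String × String))) (batch_size : Int) (out : List (List String) × List (List String) × List (List String)) : Decidable (Spec_convert_examples_to_data dataset batch_size out) := by unfold Spec_convert_examples_to_data; infer_instance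

def pvDiffWitness_convert_examples_to_data : (List (List (String × String))) × Int :=
  ([[("sentence1", "a"), ("sentence2", "b"), ("label", "c")]], -1)
def pvDiffWitnessOut_convert_examples_to_data : (List (List String) × List (List String) × List (List String)) × (List (List String) × List (List String) × List (List String)) :=
  (([["a"]], [["b"]], [["c"]]), ([], [], []))

-- ===== CLAIM (what is proved, stated in full; the proofs are below) =====
def Claim_unchanged_convert_examples_to_data : Prop := ∀ (dataset : List (List (String × String))) (batch_size : Int), Dom_convert_examples_to_data dataset batch_size → Pre_convert_examples_to_data dataset batch_size → Spec_convert_examples_to_data dataset batch_size (convert_examples_to_data dataset batch_size)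
def Claim_changed_convert_examples_to_data : Prop := Dom_convert_examples_to_data (pvDiffWitness_convert_examples_to_data.1) (pvDiffWitness_convert_examples_to_data.2) ∧ Pre_convert_examples_to_data (pvDiffWitness_convert_examples_to_data.1) (pvDiffWitness_convert_examples_to_data.2) ∧ D_convert_examples_to_data (pvDiffWitness_convert_examples_to_data.1) (pvDiffWitness_convert_examples_to_data.2) ∧ convert_examples_to_data (pvDiffWitness_convert_examples_to_data.1) (pvDiffWitness_convert_examples_to_data.2) = pvDiffWitnessOut_convert_examples_to_data.1 ∧ convert_examples_to_data_alt (pvDiffWitness_convert_examples_to_data.1) (pvDiffWitness_convert_examples_to_data.2) = pvDiffWitnessOut_convert_examples_to_data.2 ∧ pvDiffWitnessOut_convert_examples_to_data.1 ≠ pvDiffWitnessOut_convert_examples_to_data.2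
def Claim_exact_convert_examples_to_data : Prop := ∀ (dataset : List (List (String × String))) (batch_size : Int), Dom_convert_examples_to_data dataset batch_size → Pre_convert_examples_to_data dataset batch_size → D_convert_examples_to_data dataset batch_size → convert_examples_to_data dataset batch_size ≠ convert_examples_to_data_alt dataset batch_size

-- ===== LEMMAS AND PROOFS =====

-- the loop body never fires when batch_size is nonpositive or exceeds the remaining length
lemma bChunks_nil_of (batch_size : Int) (fuel : Nat) (xs : List String)
    (h : ¬ (0 < batch_size ∧ batch_size ≤ (xs.length : Int))) : bChunks batch_size fuel xs = [] := by
  cases fuel with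
  | zero => rfl
  | succ fuel => rw [bChunks, if_neg h]

-- the result does not depend on the fuel once the fuel covers the list
lemma bChunks_fuel (batch_size : Int) :
    ∀ (f g : Nat) (xs : List String), xs.length ≤ f → xs.length ≤ g →
      bChunks batch_size f xs = bChunks batch_size g xs := by
  intro f
  induction f with
  | zero =>
    intro g xs hf _
    have hx : xs.length = 0 := by omega
    refine (bChunks_nil_of _ _ _ ?_).trans (bChunks_nil_of _ _ _ ?_).symm <;> (rw [hx]; omega)
  | succ f ih =>
    intro g xs hf hg
    by_cases hc : 0 < batch_size ∧ batch_size ≤ (xs.length : Int)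
    · have hx : 1 ≤ xs.length := by omega
      cases g with
      | zero => omega
      | succ g =>
        rw [bChunks, bChunks, if_pos hc, if_pos hc]
        have hd : (PySem.List.slice xs (some batch_size) none).length = xs.length - batch_size.toNat := by
          rw [PySem.List.slice_from xs (by omega)]; simp
        congr 1
        apply ih <;> omega
    · rw [bChunks_nil_of _ _ _ hc, bChunks_nil_of _ _ _ hc]

-- one pass of B's while loop, with the canonical fuel
lemma bChunks_cons (batch_size : Int) (xs : List String)
    (h1 : 0 < batch_size) (h2 : batch_size ≤ (xs.length : Int)) :
    bChunks batch_size xs.length xs =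
      xs.take batch_size.toNat ::
        bChunks batch_size (xs.drop batch_size.toNat).length (xs.drop batch_size.toNat) := by
  have hx : 1 ≤ xs.length := by omega
  obtain ⟨n, hn⟩ : ∃ n, xs.length = n + 1 := ⟨xs.length - 1, by omega⟩
  rw [hn, bChunks, if_pos ⟨h1, h2⟩,
    PySem.List.slice_to xs (le_of_lt h1), PySem.List.slice_from xs (le_of_lt h1)]
  congr 1
  apply bChunks_fuel <;> simp <;> omega

lemma succ_mod_eq (i k : Nat) (hk : 0 < k) :
    (i + 1) % k = if i % k + 1 = k then 0 else i % k + 1 := by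
  by_cases hk1 : k = 1
  · subst hk1; simp [Nat.mod_one]
  · have hk2 : 1 < k := by omega
    rw [Nat.add_mod i 1 k, Nat.mod_eq_of_lt hk2]
    split_ifs with h
    · rw [h, Nat.mod_self]
    · exact Nat.mod_eq_of_lt (by have := Nat.mod_lt i hk; omega)

lemma mod_succ_zero_iff (i : Nat) (bs : Int) (hbs : 0 < bs) :
    PySem.Int.mod ((i : Int) + 1) bs = 0 ↔ (i + 1) % bs.toNat = 0 := by
  rw [PySem.Int.mod_eq_zero_iff_dvd, ← Nat.dvd_iff_mod_eq_zero]
  have hb : bs = (bs.toNat : Int) := by omega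
  constructor
  · intro h
    rw [hb] at h
    have h' : (bs.toNat : Int) ∣ ((i + 1 : Nat) : Int) := by push_cast; exact h
    exact_mod_cast h'
  · intro h
    rw [hb]
    have h' : (bs.toNat : Int) ∣ ((i + 1 : Nat) : Int) := Int.natCast_dvd_natCast.mpr h
    push_cast at h' ⊢; exact h'

-- the loop invariant: with the batch buffers i % batch_size long, A's loop appends exactly
-- B's chunking of buffer ++ remaining column
lemma aLoop_pos (bs : Int) (hbs : 0 < bs) :
    ∀ (rest : List (List (String × String))) (i : Nat)
      (texts pairs labels : List (List String)) (bt bp bl : List String),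
      bt.length = i % bs.toNat → bp.length = i % bs.toNat → bl.length = i % bs.toNat →
      aLoop bs i rest texts pairs labels bt bp bl =
        (texts ++ bChunks bs (bt ++ rest.map (fun item => pvGetKey item "sentence1")).length (bt ++ rest.map (fun item => pvGetKey item "sentence1")),
         pairs ++ bChunks bs (bp ++ rest.map (fun item => pvGetKey item "sentence2")).length (bp ++ rest.map (fun item => pvGetKey item "sentence2")),
         labels ++ bChunks bs (bl ++ rest.map (fun item => pvGetKey item "label")).length (bl ++ rest.map (fun item => pvGetKey item "label"))) := by
  have hk : 0 < bs.toNat := by omega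
  intro rest
  induction rest with
  | nil =>
    intro i texts pairs labels bt bp bl hbt hbp hbl
    have hmod := Nat.mod_lt i hk
    have hnil : ∀ (ys : List String), ys.length = i % bs.toNat →
        bChunks bs (ys ++ []).length (ys ++ []) = [] := by
      intro ys hy
      apply bChunks_nil_of
      simp only [List.append_nil]
      omega
    simp only [aLoop, List.map_nil]
    rw [hnil bt hbt, hnil bp hbp, hnil bl hbl]
    simp
  | cons item rest ih =>
    intro i texts pairs labels bt bp bl hbt hbp hbl
    have hmod := Nat.mod_lt i hk
    have hsucc := succ_mod_eq i bs.toNat hk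
    simp only [aLoop, List.map_cons]
    by_cases hflush : PySem.Int.mod ((i : Int) + 1) bs = 0
    · rw [if_pos hflush]
      have h0 : (i + 1) % bs.toNat = 0 := (mod_succ_zero_iff i bs hbs).mp hflush
      have hfull : bt.length + 1 = bs.toNat := by
        by_contra hne
        rw [hsucc, if_neg (by omega)] at h0
        omega
      rw [ih (i + 1) _ _ _ [] [] [] (by simp [h0]) (by simp [h0]) (by simp [h0])]
      have hchunk : ∀ (ys : List String) (x : String) (l : List String), ys.length = i % bs.toNat →
          bChunks bs (ys ++ x :: l).length (ys ++ x :: l) = (ys ++ [x]) :: bChunks bs l.length l := by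
        intro ys x l hy
        have hassoc : ys ++ x :: l = (ys ++ [x]) ++ l := by simp
        have hlen : (ys ++ [x]).length = bs.toNat := by simp; omega
        rw [hassoc, bChunks_cons bs _ hbs (by simp only [List.length_append, hlen]; push_cast; omega)]
        rw [List.take_left' hlen, List.drop_left' hlen]
      rw [hchunk bt _ _ hbt, hchunk bp _ _ hbp, hchunk bl _ _ hbl]
      simp
    · rw [if_neg hflush]
      have h0 : (i + 1) % bs.toNat ≠ 0 := fun h => hflush ((mod_succ_zero_iff i bs hbs).mpr h)
      have hstep : (i + 1) % bs.toNat = i % bs.toNat + 1 := by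
        rw [hsucc]; split_ifs with h
        · rw [hsucc, if_pos h] at h0; omega
        · rfl
      rw [ih (i + 1) _ _ _ _ _ _ (by simp [hstep, hbt]) (by simp [hstep, hbp]) (by simp [hstep, hbl])]
      simp

-- with a negative batch size and fewer items than |batch_size|, A's loop never flushes
lemma aLoop_neg (bs : Int) (_hbs : bs < 0) :
    ∀ (rest : List (List (String × String))) (i : Nat)
      (texts pairs labels : List (List String)) (bt bp bl : List String),
      (i : Int) + rest.length < -bs →
      aLoop bs i rest texts pairs labels bt bp bl = (texts, pairs, labels) := by
  intro rest
  induction rest with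
  | nil => intro i _ _ _ _ _ _ _; simp [aLoop]
  | cons item rest ih =>
    intro i texts pairs labels bt bp bl hlt
    simp only [List.length_cons] at hlt
    have hnot : ¬ PySem.Int.mod ((i : Int) + 1) bs = 0 := by
      rw [PySem.Int.mod_eq_zero_iff_dvd]
      intro hdvd
      have h2 : -bs ∣ (i : Int) + 1 := (neg_dvd).mpr hdvd
      have := Int.le_of_dvd (by omega) h2
      push_cast at hlt
      omega
    simp only [aLoop, if_neg hnot]
    apply ih
    push_cast at hlt ⊢
    omega

lemma aLoop_fst_prefix (bs : Int) :
    ∀ (rest : List (List (String × String))) (i : Nat)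
      (texts pairs labels : List (List String)) (bt bp bl : List String),
      texts <+: (aLoop bs i rest texts pairs labels bt bp bl).1 := by
  intro rest
  induction rest with
  | nil => intro i texts _ _ _ _ _; simp [aLoop]
  | cons item rest ih =>
    intro i texts pairs labels bt bp bl
    simp only [aLoop]
    split
    · exact List.IsPrefix.trans (List.prefix_append _ _) (ih _ _ _ _ _ _ _)
    · exact ih _ _ _ _ _ _ _

-- if some step inside the remaining items flushes, A's texts output is non-empty
lemma aLoop_fst_ne_nil (bs : Int) :
    ∀ (rest : List (List (String × String))) (i : Nat)
      (texts pairs labels : List (List String)) (bt bp bl : List String),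
      (∃ j : Nat, j < rest.length ∧ PySem.Int.mod ((i : Int) + 1 + j) bs = 0) →
      (aLoop bs i rest texts pairs labels bt bp bl).1 ≠ [] := by
  intro rest
  induction rest with
  | nil =>
    intro i _ _ _ _ _ _ hex
    obtain ⟨j, hj, -⟩ := hex
    simp at hj
  | cons item rest ih =>
    intro i texts pairs labels bt bp bl hex
    obtain ⟨j, hj, hmod⟩ := hex
    simp only [aLoop]
    by_cases hflush : PySem.Int.mod ((i : Int) + 1) bs = 0
    · rw [if_pos hflush]
      intro hnil
      have hpre := aLoop_fst_prefix bs rest (i + 1)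
        (texts ++ [bt ++ [pvGetKey item "sentence1"]])
        (pairs ++ [bp ++ [pvGetKey item "sentence2"]])
        (labels ++ [bl ++ [pvGetKey item "label"]]) [] [] []
      rw [hnil] at hpre
      simp at hpre
    · rw [if_neg hflush]
      have hj0 : j ≠ 0 := by
        intro h
        subst h
        simp only [Nat.cast_zero, add_zero] at hmod
        exact hflush hmod
      apply ih
      refine ⟨j - 1, by simp only [List.length_cons] at hj; omega, ?_⟩
      have harg : ((i + 1 : Nat) : Int) + 1 + ((j - 1 : Nat) : Int) = (i : Int) + 1 + j := by
        push_cast [Nat.cast_sub (by omega : 1 ≤ j)]; ring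
      rw [harg]
      exact hmod

-- ===== VERDICT (by name: the statement is the Claim_ definition above) =====
theorem convert_examples_to_data_spec : Claim_unchanged_convert_examples_to_data := by
  intro dataset batch_size _ hpre hnd
  unfold convert_examples_to_data convert_examples_to_data_alt bColumn
  rcases lt_trichotomy batch_size 0 with hneg | hz | hpos
  · -- negative batch size outside D_: dataset shorter than |batch_size|, no flush ever
    have hlen : (dataset.length : Int) < -batch_size := by
      unfold D_convert_examples_to_data at hnd
      push Not at hnd
      exact hnd hneg
    rw [aLoop_neg batch_size hneg dataset 0 _ _ _ _ _ _ (by push_cast; omega)]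
    rw [bChunks_nil_of _ _ _ (by omega), bChunks_nil_of _ _ _ (by omega),
      bChunks_nil_of _ _ _ (by omega)]
  · -- batch_size = 0: Pre_ forces the dataset empty
    subst hz
    rcases hpre.1 with h | h
    · exact absurd rfl h
    · subst h; rfl
  · -- positive batch size: the loop invariant
    rw [aLoop_pos batch_size hpos dataset 0 [] [] [] [] [] [] (by simp) (by simp) (by simp)]
    simp only [List.nil_append]

theorem convert_examples_to_data_changed : Claim_changed_convert_examples_to_data := by
  unfold Claim_changed_convert_examples_to_data
  decide

theorem convert_examples_to_data_tight : Claim_exact_convert_examples_to_data := by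
  intro dataset batch_size _ _ hd
  obtain ⟨hneg, hlen⟩ := hd
  intro heq
  have hne : (convert_examples_to_data dataset batch_size).1 ≠ [] := by
    unfold convert_examples_to_data
    apply aLoop_fst_ne_nil batch_size dataset 0
    refine ⟨(-batch_size).toNat - 1, by omega, ?_⟩
    have harg : ((0 : Nat) : Int) + 1 + (((-batch_size).toNat - 1 : Nat) : Int) = -batch_size := by
      push_cast [Nat.cast_sub (by omega : 1 ≤ (-batch_size).toNat)]
      omega
    rw [harg, PySem.Int.mod_eq_zero_iff_dvd]
    exact (dvd_neg).mpr dvd_rfl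
  apply hne
  rw [heq]
  unfold convert_examples_to_data_alt
  exact bChunks_nil_of _ _ _ (by omega)
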